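-- pv_equiv track=rewrite | github.com/priyanshuparewa-cmky/PythonProject | StudentPerformanceAnalysis.py | subject_distribution
-- ===== SOURCE A (Python) =====
-- def subject_distribution(students, subject):
--     ranges = {
--         '90-100': 0,
--         '80-89': 0,
--         '70-79': 0,
--         '60-69': 0,
--         '50-59': 0,
--         '40-49': 0,
--         'Below 40': 0
--     }
--
--     for student in students:
--         score = student[subject]
--         if score >= 90:
--             ranges['90-100'] += 1
--         elif score >= 80:
--             ranges['80-89'] += 1
--         elif score >= 70:
--             ranges['70-79'] += 1
--         elif score >= 60:
--             ranges['60-69'] += 1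
--         elif score >= 50:
--             ranges['50-59'] += 1
--         elif score >= 40:
--             ranges['40-49'] += 1
--         else:
--             ranges['Below 40'] += 1
--
--     return ranges
-- ===== SOURCE B (Python) =====
-- def subject_distribution(students, subject):
--     # Arithmetic bucketing: map each score to a bucket index 0..6 in one
--     # comprehension, then count each bucket; no seven-way if/elif chain.
--     labels = ['90-100', '80-89', '70-79', '60-69', '50-59', '40-49', 'Below 40']
--     idxs = [min(6, max(0, 9 - student[subject] // 10)) for student in students]
--     return {lab: idxs.count(i) for i, lab in enumerate(labels)}
-- ===== Notes on version B (the rewrite author's own statement) =====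
-- stated objective: simpler
-- what changed: Replaces the seven-way if/elif cascade updating a dict in place with a closed-form bucket index (min(6, max(0, 9 - score//10))) computed per student in one comprehension, followed by a per-label count.
import Mathlib
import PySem

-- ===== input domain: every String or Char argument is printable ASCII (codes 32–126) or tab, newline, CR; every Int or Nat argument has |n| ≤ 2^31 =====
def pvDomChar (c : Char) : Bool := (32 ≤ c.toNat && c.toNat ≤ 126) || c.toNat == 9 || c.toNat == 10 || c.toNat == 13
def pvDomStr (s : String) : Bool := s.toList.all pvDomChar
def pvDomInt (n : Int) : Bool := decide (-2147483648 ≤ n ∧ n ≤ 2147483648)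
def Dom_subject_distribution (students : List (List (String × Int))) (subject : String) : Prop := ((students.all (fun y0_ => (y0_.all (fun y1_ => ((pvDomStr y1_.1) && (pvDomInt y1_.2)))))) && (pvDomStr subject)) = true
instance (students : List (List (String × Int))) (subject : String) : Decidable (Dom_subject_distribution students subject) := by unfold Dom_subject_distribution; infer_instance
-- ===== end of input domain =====

-- B replaces A's seven-way if/elif dict-update cascade by a closed-form bucket
-- index per student followed by a per-label count (objective: simpler).

-- ===== PORT A =====
-- student[subject] (first match = Python dict lookup); keys exist under Pre_, default never used there
def pvScore (st : List (String × Int)) (subject : String) : Int :=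
  ((PySem.Dict.mk st).get? subject).getD 0

def pvStepA (subject : String) (r : PySem.Dict String Int) (st : List (String × Int)) : PySem.Dict String Int :=
  let score := pvScore st subject
  if score ≥ 90 then r.modify "90-100" 0 (· + 1)
  else if score ≥ 80 then r.modify "80-89" 0 (· + 1)
  else if score ≥ 70 then r.modify "70-79" 0 (· + 1)
  else if score ≥ 60 then r.modify "60-69" 0 (· + 1)
  else if score ≥ 50 then r.modify "50-59" 0 (· + 1)
  else if score ≥ 40 then r.modify "40-49" 0 (· + 1)
  else r.modify "Below 40" 0 (· + 1)

def subject_distribution (students : List (List (String × Int))) (subject : String) : List (String × Int) :=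
  (students.foldl (pvStepA subject)
    (PySem.Dict.mk [("90-100", 0), ("80-89", 0), ("70-79", 0), ("60-69", 0),
                    ("50-59", 0), ("40-49", 0), ("Below 40", 0)])).items

-- ===== PORT B =====
def pvBucket (s : Int) : Int := min 6 (max 0 (9 - PySem.Int.floordiv s 10))

def subject_distribution_alt (students : List (List (String × Int))) (subject : String) : List (String × Int) :=
  let labels : List String := ["90-100", "80-89", "70-79", "60-69", "50-59", "40-49", "Below 40"]
  let idxs : List Int := students.map (fun st => pvBucket (pvScore st subject))
  -- labels are pairwise distinct, so the dict comprehension in label order IS this list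
  (PySem.List.enumerate labels).map (fun p => (p.2, (idxs.count p.1 : Int)))

-- ===== PRECONDITION & SPEC =====
-- Pre_ excludes inputs where some student lacks the subject key: there Python A
-- (and Python B) raise KeyError.
def Pre_subject_distribution (students : List (List (String × Int))) (subject : String) : Prop :=
  (students.all (fun st => st.any (fun p => p.1 == subject))) = true
instance (students : List (List (String × Int))) (subject : String) : Decidable (Pre_subject_distribution students subject) := by unfold Pre_subject_distribution; infer_instance

def pvWitness_subject_distribution : (List (List (String × Int))) × String :=
  ([[("math", 95), ("eng", 41)], [("math", 12)]], "math")

def Spec_subject_distribution (students : List (List (String × Int))) (subject : String) (out : List (String × Int)) : Prop := out = subject_distribution_alt students subject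
instance (students : List (List (String × Int))) (subject : String) (out : List (String × Int)) : Decidable (Spec_subject_distribution students subject out) := by unfold Spec_subject_distribution; infer_instance

-- ===== CLAIM (what is proved, stated in full; the proofs are below) =====
def Claim_equal_subject_distribution : Prop := ∀ (students : List (List (String × Int))) (subject : String), Dom_subject_distribution students subject → Pre_subject_distribution students subject → Spec_subject_distribution students subject (subject_distribution students subject)

-- ===== LEMMAS AND PROOFS =====

def mk7 (c0 c1 c2 c3 c4 c5 c6 : Int) : PySem.Dict String Int :=
  PySem.Dict.mk [("90-100", c0), ("80-89", c1), ("70-79", c2), ("60-69", c3),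
                 ("50-59", c4), ("40-49", c5), ("Below 40", c6)]

theorem bucket_bounds (s : Int) :
    10 * PySem.Int.floordiv s 10 ≤ s ∧ s < 10 * PySem.Int.floordiv s 10 + 10 := by
  have h1 := PySem.Int.floordiv_mul_add_mod s 10
  have h2 := PySem.Int.mod_nonneg s (b := 10) (by norm_num)
  have h3 := PySem.Int.mod_lt s (b := 10) (by norm_num)
  omega

theorem stepA_mk7 (subject : String) (c0 c1 c2 c3 c4 c5 c6 : Int) (st : List (String × Int)) :
    pvStepA subject (mk7 c0 c1 c2 c3 c4 c5 c6) st =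
      mk7 (c0 + if pvBucket (pvScore st subject) = 0 then 1 else 0)
          (c1 + if pvBucket (pvScore st subject) = 1 then 1 else 0)
          (c2 + if pvBucket (pvScore st subject) = 2 then 1 else 0)
          (c3 + if pvBucket (pvScore st subject) = 3 then 1 else 0)
          (c4 + if pvBucket (pvScore st subject) = 4 then 1 else 0)
          (c5 + if pvBucket (pvScore st subject) = 5 then 1 else 0)
          (c6 + if pvBucket (pvScore st subject) = 6 then 1 else 0) := by
  have hb := bucket_bounds (pvScore st subject)
  unfold pvStepA
  set s := pvScore st subject with hs
  by_cases h1 : s ≥ 90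
  · have e : pvBucket s = 0 := by unfold pvBucket; omega
    simp [h1, e, mk7, PySem.Dict.modify, PySem.Dict.insert, PySem.Dict.getD, PySem.Dict.get?]
  by_cases h2 : s ≥ 80
  · have e : pvBucket s = 1 := by unfold pvBucket; omega
    simp [h1, h2, e, mk7, PySem.Dict.modify, PySem.Dict.insert, PySem.Dict.getD, PySem.Dict.get?]
  by_cases h3 : s ≥ 70
  · have e : pvBucket s = 2 := by unfold pvBucket; omega
    simp [h1, h2, h3, e, mk7, PySem.Dict.modify, PySem.Dict.insert, PySem.Dict.getD, PySem.Dict.get?]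
  by_cases h4 : s ≥ 60
  · have e : pvBucket s = 3 := by unfold pvBucket; omega
    simp [h1, h2, h3, h4, e, mk7, PySem.Dict.modify, PySem.Dict.insert, PySem.Dict.getD, PySem.Dict.get?]
  by_cases h5 : s ≥ 50
  · have e : pvBucket s = 4 := by unfold pvBucket; omega
    simp [h1, h2, h3, h4, h5, e, mk7, PySem.Dict.modify, PySem.Dict.insert, PySem.Dict.getD, PySem.Dict.get?]
  by_cases h6 : s ≥ 40
  · have e : pvBucket s = 5 := by unfold pvBucket; omega
    simp [h1, h2, h3, h4, h5, h6, e, mk7, PySem.Dict.modify, PySem.Dict.insert, PySem.Dict.getD, PySem.Dict.get?]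
  · have e : pvBucket s = 6 := by unfold pvBucket; omega
    simp [h1, h2, h3, h4, h5, h6, e, mk7, PySem.Dict.modify, PySem.Dict.insert, PySem.Dict.getD, PySem.Dict.get?]

-- count of bucket i among the scores, as an Int, in fold form
def icnt (i : Int) : List Int → Int
  | [] => 0
  | s :: rest => (if pvBucket s = i then 1 else 0) + icnt i rest

theorem foldA_mk7 (subject : String) (students : List (List (String × Int)))
    (c0 c1 c2 c3 c4 c5 c6 : Int) :
    students.foldl (pvStepA subject) (mk7 c0 c1 c2 c3 c4 c5 c6) =
      mk7 (c0 + icnt 0 (students.map (fun st => pvScore st subject)))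
          (c1 + icnt 1 (students.map (fun st => pvScore st subject)))
          (c2 + icnt 2 (students.map (fun st => pvScore st subject)))
          (c3 + icnt 3 (students.map (fun st => pvScore st subject)))
          (c4 + icnt 4 (students.map (fun st => pvScore st subject)))
          (c5 + icnt 5 (students.map (fun st => pvScore st subject)))
          (c6 + icnt 6 (students.map (fun st => pvScore st subject))) := by
  induction students generalizing c0 c1 c2 c3 c4 c5 c6 with
  | nil => simp [icnt]
  | cons st rest ih =>
    simp only [List.foldl_cons, List.map_cons, icnt, stepA_mk7, ih]
    simp only [add_assoc]

theorem icnt_eq_count (i : Int) (scores : List Int) :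
    icnt i scores = ((scores.map pvBucket).count i : Int) := by
  induction scores with
  | nil => simp [icnt]
  | cons s rest ih =>
    simp [icnt, ih, List.count_cons]
    by_cases h : pvBucket s = i <;> simp [h]
    omega

-- ===== VERDICT (by name: the statement is the Claim_ definition above) =====
theorem subject_distribution_spec : Claim_equal_subject_distribution := by
  intro students subject _ _
  unfold Spec_subject_distribution subject_distribution subject_distribution_alt
  show (students.foldl (pvStepA subject) (mk7 0 0 0 0 0 0 0)).items = _
  rw [foldA_mk7]
  simp only [mk7, PySem.List.enumerate, List.map]
  simp [icnt_eq_count, List.map_map, Function.comp_def]
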